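-- pv_equiv track=rewrite | github.com/miliar/Code_Jam_Webscraper | solutions_python/solutions_year09_round0_nr1/254.py | run_problem
-- ===== SOURCE A (Python) =====
-- import itertools
--
-- def fits(word, pattern):
--     for w, p in itertools.izip(word, pattern):
--         if w not in p:
--             return False
--     return True
--
-- def run_problem(dictionary, patterns):
--     patterns = [list(pattern) for pattern in patterns]
--     ret = [0] * len(patterns)
--     for word in dictionary:
--         c = 0
--         for pattern in patterns:
--             if fits(word, pattern):
--                 ret[c] += 1
--             c += 1
--     return ret
-- ===== SOURCE B (Python) =====
-- def run_problem(dictionary, patterns):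
--     # Index the dictionary once: count every word, and every prefix of every word.
--     # A word w fits pattern p iff they agree on their common length, i.e.
--     # p is a prefix of w (counted by prefix_count[p]) or w is a proper prefix
--     # of p (counted by word_count over p's proper prefixes) -- disjoint cases.
--     prefix_count = {}
--     word_count = {}
--     for w in dictionary:
--         word_count[w] = word_count.get(w, 0) + 1
--         for k in range(len(w) + 1):
--             q = w[:k]
--             prefix_count[q] = prefix_count.get(q, 0) + 1
--     return [prefix_count.get(p, 0)
--             + sum(word_count.get(p[:k], 0) for k in range(len(p)))
--             for p in patterns]
-- ===== Notes on version B (the rewrite author's own statement) =====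
-- stated objective: faster
-- what changed: Instead of testing every (word, pattern) pair with a per-character scan, B indexes the dictionary once into a word counter and a prefix counter and answers each pattern with hash lookups (a word fits iff the pattern is a prefix of it or it is a proper prefix of the pattern).
import Mathlib
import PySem

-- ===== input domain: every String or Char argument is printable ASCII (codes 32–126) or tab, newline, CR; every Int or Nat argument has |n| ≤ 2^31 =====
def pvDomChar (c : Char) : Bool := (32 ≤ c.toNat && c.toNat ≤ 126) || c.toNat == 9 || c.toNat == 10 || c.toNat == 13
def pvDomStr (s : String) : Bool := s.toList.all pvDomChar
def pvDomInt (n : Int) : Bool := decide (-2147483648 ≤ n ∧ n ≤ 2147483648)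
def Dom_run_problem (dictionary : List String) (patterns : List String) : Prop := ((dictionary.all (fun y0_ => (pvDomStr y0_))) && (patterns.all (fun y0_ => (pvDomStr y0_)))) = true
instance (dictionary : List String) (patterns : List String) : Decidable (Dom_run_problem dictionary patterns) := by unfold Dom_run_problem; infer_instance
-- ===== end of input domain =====

-- B re-implements A by indexing the dictionary once (a word counter and a prefix counter) and
-- answering each pattern by dictionary lookups, instead of scanning the whole dictionary per pattern.

-- ===== PORT A =====
-- list(pattern) makes 1-char strings, so 'w not in p' is char inequality; izip truncates to the
-- shorter sequence (ported as List.zip); the early-return loop is List.all.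
def fits (word : List Char) (pattern : List Char) : Bool :=
  (word.zip pattern).all (fun wp => wp.1 == wp.2)

def run_problem (dictionary : List String) (patterns : List String) : List Int :=
  let pats := patterns.map (fun pattern => pattern.toList)
  let ret : List Int := List.replicate pats.length 0
  dictionary.foldl (fun ret word =>
    (pats.foldl (fun (st : List Int × Nat) pattern =>
      (if fits word.toList pattern then st.1.set st.2 (st.1.getD st.2 0 + 1) else st.1,
       st.2 + 1)) (ret, 0)).1) ret

-- ===== PORT B =====
-- w[:k] with 0 ≤ k (exact: PySem slice with a nonnegative upper bound).
def prefB (w : String) (k : Int) : String := String.ofList (PySem.List.slice w.toList none (some k))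

def run_problem_alt (dictionary : List String) (patterns : List String) : List Int :=
  let st := dictionary.foldl
    (fun (st : PySem.Dict String Int × PySem.Dict String Int) w =>
      ((PySem.List.pyRange 0 (PySem.Str.len w + 1) 1).foldl
          (fun pc k => let q := prefB w k; pc.insert q (pc.getD q 0 + 1)) st.1,
       st.2.insert w (st.2.getD w 0 + 1)))
    (PySem.Dict.empty, PySem.Dict.empty)
  patterns.map (fun p =>
    st.1.getD p 0 +
      ((PySem.List.pyRange 0 (PySem.Str.len p) 1).map (fun k => st.2.getD (prefB p k) 0)).sum)

-- ===== PRECONDITION & SPEC =====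
def Spec_run_problem (dictionary : List String) (patterns : List String) (out : List Int) : Prop := out = run_problem_alt dictionary patterns
instance (dictionary : List String) (patterns : List String) (out : List Int) : Decidable (Spec_run_problem dictionary patterns out) := by unfold Spec_run_problem; infer_instance

-- ===== CLAIM (what is proved, stated in full; the proofs are below) =====
def Claim_equal_run_problem : Prop := ∀ (dictionary : List String) (patterns : List String), Dom_run_problem dictionary patterns → Spec_run_problem dictionary patterns (run_problem dictionary patterns)

-- ===== LEMMAS AND PROOFS =====

-- the per-word contribution of `word` to pattern `p`'s count in A
def indF (w p : List Char) : Int := if fits w p then 1 else 0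

-- the prefixes of w enumerated by B's inner loop, as a plain List.range map
def prefKeys (w : String) : List String :=
  (List.range (w.toList.length + 1)).map (fun k => String.ofList (w.toList.take k))

theorem getD_mid (pre rs : List Int) (r : Int) : (pre ++ r :: rs).getD pre.length 0 = r := by
  simp [List.getD_eq_getElem?_getD]

theorem set_mid (pre rs : List Int) (r v : Int) : (pre ++ r :: rs).set pre.length v = pre ++ v :: rs := by
  rw [List.set_append]; simp

-- A's inner loop over the patterns, started at position pre.length, bumps each slot by indF
theorem innerA (word : List Char) (pats : List (List Char)) :
    ∀ (pre ret : List Int), ret.length = pats.length →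
    (pats.foldl (fun (st : List Int × Nat) pattern =>
      (if fits word pattern then st.1.set st.2 (st.1.getD st.2 0 + 1) else st.1,
       st.2 + 1)) (pre ++ ret, pre.length)).1
    = pre ++ List.zipWith (fun r p => r + indF word p) ret pats := by
  induction pats with
  | nil =>
    intro pre ret h
    rw [List.length_eq_zero_iff.mp h]
    simp
  | cons p ps ih =>
    intro pre ret h
    match ret, h with
    | r :: rs, h =>
      simp only [List.foldl_cons, List.zipWith_cons_cons]
      by_cases hf : fits word p
      · rw [if_pos hf, getD_mid, set_mid]
        have h1 : pre ++ (r + 1) :: rs = (pre ++ [r + 1]) ++ rs := by simp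
        have h2 : pre.length + 1 = (pre ++ [r + 1]).length := by simp
        rw [h1, h2, ih _ rs (by simpa using h)]
        simp [indF, hf]
      · rw [if_neg hf]
        have h1 : pre ++ r :: rs = (pre ++ [r]) ++ rs := by simp
        have h2 : pre.length + 1 = (pre ++ [r]).length := by simp
        rw [h1, h2, ih _ rs (by simpa using h)]
        simp [indF, hf]

-- A's whole double loop adds, per pattern, the number of fitting words
theorem outerA (pats : List (List Char)) (ws : List String) :
    ∀ (init : List Int), init.length = pats.length →
    ws.foldl (fun ret word =>
      (pats.foldl (fun (st : List Int × Nat) pattern =>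
        (if fits word.toList pattern then st.1.set st.2 (st.1.getD st.2 0 + 1) else st.1,
         st.2 + 1)) (ret, 0)).1) init
    = List.zipWith (fun i p => i + (ws.countP (fun w => fits w.toList p) : Int)) init pats := by
  induction ws with
  | nil =>
    intro init h
    apply List.ext_getElem
    · simp [h]
    · intro n h1 h2
      simp
  | cons w ws ih =>
    intro init h
    rw [List.foldl_cons]
    have e1 : (init, 0) = ((([] : List Int) ++ init), ([] : List Int).length) := by simp
    rw [e1, innerA w.toList pats [] init h, List.nil_append]
    rw [ih _ (by simp [h])]
    apply List.ext_getElem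
    · simp [h]
    · intro n h1 h2
      have hn : n < pats.length := by simp [h] at h2; omega
      simp only [List.getElem_zipWith, List.countP_cons]
      unfold indF
      by_cases hf : fits w.toList (pats[n]'hn) <;> simp [hf] <;> ring

-- closed form of port A
theorem runA_eq (dictionary patterns : List String) :
    run_problem dictionary patterns
    = patterns.map (fun p => (dictionary.countP (fun w => fits w.toList p.toList) : Int)) := by
  unfold run_problem
  rw [outerA _ _ _ (by simp)]
  apply List.ext_getElem
  · simp
  · intro n h1 h2
    simp

-- B's inner range enumerates exactly prefKeys
theorem prefRange_eq (w : String) :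
    (PySem.List.pyRange 0 (PySem.Str.len w + 1) 1).map (prefB w) = prefKeys w := by
  have h : PySem.Str.len w + 1 = ((w.toList.length + 1 : Nat) : Int) := by
    simp [PySem.Str.len_eq]
  rw [h, PySem.List.pyRange_zero_natCast, List.map_map]
  unfold prefKeys
  apply List.map_congr_left
  intro k _
  simp [prefB, PySem.List.slice_to w.toList (by positivity : (0:Int) ≤ (k:Int))]

-- B's prefix-counter fold counts occurrences of p among all prefixes of all words
theorem pcFold (p : String) (ws : List String) :
    ∀ (d : PySem.Dict String Int),
    (ws.foldl (fun pc w => (PySem.List.pyRange 0 (PySem.Str.len w + 1) 1).foldl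
        (fun pc k => let q := prefB w k; pc.insert q (pc.getD q 0 + 1)) pc) d).getD p 0
    = d.getD p 0 + ((ws.flatMap prefKeys).count p : Int) := by
  induction ws with
  | nil => intro d; simp
  | cons w ws ih =>
    intro d
    rw [List.foldl_cons, ih]
    have e : (PySem.List.pyRange 0 (PySem.Str.len w + 1) 1).foldl
        (fun pc k => let q := prefB w k; pc.insert q (pc.getD q 0 + 1)) d
      = (prefKeys w).foldl (fun pc q => pc.insert q (pc.getD q 0 + 1)) d := by
      rw [← prefRange_eq, List.foldl_map]
    rw [e, PySem.Dict.getD_foldl_insert_add_one]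
    simp [List.count_append]
    ring

-- closed form of port B
theorem runB_eq (dictionary patterns : List String) :
    run_problem_alt dictionary patterns
    = patterns.map (fun p =>
        ((dictionary.flatMap prefKeys).count p : Int) +
        ((List.range p.toList.length).map
          (fun k => (dictionary.count (String.ofList (p.toList.take k)) : Int))).sum) := by
  unfold run_problem_alt
  have hst := PySem.List.foldl_prod_mk
    (f := fun (pc : PySem.Dict String Int) (w : String) =>
      (PySem.List.pyRange 0 (PySem.Str.len w + 1) 1).foldl
        (fun pc k => let q := prefB w k; pc.insert q (pc.getD q 0 + 1)) pc)
    (g := fun (wc : PySem.Dict String Int) (w : String) => wc.insert w (wc.getD w 0 + 1))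
    dictionary PySem.Dict.empty PySem.Dict.empty
  rw [hst]
  apply List.map_congr_left
  intro p _
  simp only
  rw [pcFold, PySem.Dict.getD_empty, zero_add]
  congr 1
  · have h : PySem.Str.len p = ((p.toList.length : Nat) : Int) := by simp [PySem.Str.len_eq]
    rw [h, PySem.List.pyRange_zero_natCast, List.map_map]
    congr 1
    apply List.map_congr_left
    intro k _
    simp only [Function.comp]
    rw [PySem.Dict.getD_foldl_insert_add_one, PySem.Dict.getD_empty, zero_add]
    congr 1
    simp [prefB, PySem.List.slice_to p.toList (by positivity : (0:Int) ≤ (k:Int))]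

-- A's test: word and pattern agree on their common length, i.e. one is a prefix of the other
theorem fits_iff (w p : List Char) : fits w p = true ↔ (p <+: w ∨ w <+: p) := by
  induction w generalizing p with
  | nil => simp [fits]
  | cons a w ih =>
    cases p with
    | nil => simp [fits]
    | cons b q =>
      simp only [fits, List.zip_cons_cons, List.all_cons, Bool.and_eq_true, beq_iff_eq,
        List.cons_prefix_cons]
      rw [show (List.all (w.zip q) fun wp => wp.1 == wp.2) = fits w q from rfl, ih]
      constructor
      · rintro ⟨h1, h2 | h2⟩
        · exact Or.inl ⟨h1.symm, h2⟩
        · exact Or.inr ⟨h1, h2⟩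
      · rintro (⟨h1, h2⟩ | ⟨h1, h2⟩)
        · exact ⟨h1.symm, Or.inl h2⟩
        · exact ⟨h1, Or.inr h2⟩

theorem ofList_eq_iff (xs : List Char) (p : String) : (String.ofList xs = p) ↔ xs = p.toList := by
  constructor
  · intro h; rw [← h]; simp
  · intro h; rw [h]; simp

-- p occurs among w's prefixes exactly once iff p is a prefix of w (prefixes have distinct lengths)
theorem countPref (w p : String) :
    (prefKeys w).count p = if p.toList <+: w.toList then 1 else 0 := by
  unfold prefKeys
  rw [List.count_eq_countP, List.countP_map]
  by_cases h : p.toList <+: w.toList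
  · rw [if_pos h]
    have hcong : ∀ k ∈ List.range (w.toList.length + 1),
        (((fun a => a == p) ∘ fun k => String.ofList (w.toList.take k)) k = true
          ↔ ((fun k => k == p.toList.length) k = true)) := by
      intro k hk
      simp only [Function.comp, beq_iff_eq, ofList_eq_iff]
      simp only [List.mem_range] at hk
      constructor
      · intro he
        have : (w.toList.take k).length = k := by
          rw [List.length_take]; omega
        rw [he] at this; omega
      · intro hk2
        subst hk2
        exact (List.prefix_iff_eq_take.mp h).symm
    have hlt : p.toList.length < w.toList.length + 1 := by
      have := h.length_le; omega
    rw [List.countP_congr hcong, ← List.count_eq_countP, List.count_range, if_pos hlt]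
  · rw [if_neg h, List.countP_eq_zero]
    intro k _
    simp only [Function.comp, beq_iff_eq, ofList_eq_iff]
    intro he
    exact h (he ▸ List.take_prefix k w.toList)

-- w occurs among p's proper prefixes exactly once iff w is a strict prefix of p
theorem countStrict (w p : String) :
    (List.range p.toList.length).countP (fun k => w == String.ofList (p.toList.take k))
    = if w.toList <+: p.toList ∧ w.toList.length < p.toList.length then 1 else 0 := by
  by_cases h : w.toList <+: p.toList ∧ w.toList.length < p.toList.length
  · rw [if_pos h]
    have hcong : ∀ k ∈ List.range p.toList.length,
        ((w == String.ofList (p.toList.take k)) = true ↔ ((fun k => k == w.toList.length) k = true)) := by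
      intro k hk
      simp only [List.mem_range] at hk
      simp only [beq_iff_eq]
      constructor
      · intro he
        rw [eq_comm, ofList_eq_iff] at he
        have hl : (p.toList.take k).length = k := by rw [List.length_take]; omega
        rw [he] at hl; omega
      · intro hk2
        subst hk2
        rw [eq_comm, ofList_eq_iff]
        exact (List.prefix_iff_eq_take.mp h.1).symm
    rw [List.countP_congr hcong, ← List.count_eq_countP, List.count_range, if_pos h.2]
  · rw [if_neg h, List.countP_eq_zero]
    intro k hk
    simp only [List.mem_range] at hk
    simp only [beq_iff_eq]
    intro he
    rw [eq_comm, ofList_eq_iff] at he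
    apply h
    constructor
    · exact he ▸ List.take_prefix k p.toList
    · have : (p.toList.take k).length = k := by rw [List.length_take]; omega
      rw [he] at this; omega

-- the two disjoint cases of fits split between B's two counters
theorem perWord (w p : String) :
    ((prefKeys w).count p : Int)
      + ((List.range p.toList.length).countP (fun k => w == String.ofList (p.toList.take k)) : Int)
    = indF w.toList p.toList := by
  rw [countPref, countStrict]
  unfold indF
  by_cases h1 : p.toList <+: w.toList
  · have hne : ¬ (w.toList <+: p.toList ∧ w.toList.length < p.toList.length) := by
      rintro ⟨_, hlt⟩
      exact absurd h1.length_le (by omega)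
    rw [if_pos h1, if_neg hne, if_pos (fits_iff _ _ |>.mpr (Or.inl h1))]
    simp
  · by_cases h2 : w.toList <+: p.toList
    · have hlt : w.toList.length < p.toList.length := by
        rcases lt_or_eq_of_le h2.length_le with h | h
        · exact h
        · exact absurd (h2.eq_of_length h ▸ List.prefix_refl _) h1
      rw [if_neg h1, if_pos ⟨h2, hlt⟩, if_pos (fits_iff _ _ |>.mpr (Or.inr h2))]
      simp
    · rw [if_neg h1, if_neg (by tauto), if_neg (by rw [fits_iff]; tauto)]
      simp

-- double counting: B's two lookups sum to A's fitting-word count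
theorem mainCount (p : String) (ws : List String) :
    ((ws.flatMap prefKeys).count p : Int) +
      ((List.range p.toList.length).map
        (fun k => (ws.count (String.ofList (p.toList.take k)) : Int))).sum
    = (ws.countP (fun w => fits w.toList p.toList) : Int) := by
  induction ws with
  | nil => simp
  | cons w ws ih =>
    rw [List.flatMap_cons, List.count_append, List.countP_cons]
    have hsum : ((List.range p.toList.length).map
        (fun k => ((w :: ws).count (String.ofList (p.toList.take k)) : Int))).sum
      = ((List.range p.toList.length).map
          (fun k => (ws.count (String.ofList (p.toList.take k)) : Int))).sum
        + ((List.range p.toList.length).countP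
            (fun k => w == String.ofList (p.toList.take k)) : Int) := by
      have e : ∀ k : Nat, ((w :: ws).count (String.ofList (p.toList.take k)) : Int)
          = (ws.count (String.ofList (p.toList.take k)) : Int)
            + (if w == String.ofList (p.toList.take k) then (1:Int) else 0) := by
        intro k
        rw [List.count_cons]
        split_ifs with hh <;> simp
      calc ((List.range p.toList.length).map
            (fun k => ((w :: ws).count (String.ofList (p.toList.take k)) : Int))).sum
          = ((List.range p.toList.length).map
            (fun k => (ws.count (String.ofList (p.toList.take k)) : Int)
              + (if w == String.ofList (p.toList.take k) then (1:Int) else 0))).sum := by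
            exact congrArg _ (List.map_congr_left (fun k _ => e k))
        _ = _ := by
            rw [PySem.List.sum_map_add_int, PySem.List.sum_map_ite_one_zero]
    rw [hsum]
    have hpw := perWord w p
    unfold indF at hpw
    push_cast
    push_cast at ih hpw
    by_cases hf : fits w.toList p.toList
    · simp only [hf, if_true] at hpw ⊢
      omega
    · simp only [hf] at hpw ⊢
      omega

-- ===== VERDICT (by name: the statement is the Claim_ definition above) =====
theorem run_problem_spec : Claim_equal_run_problem := by
  intro dictionary patterns _
  show _ = _
  rw [runA_eq, runB_eq]
  exact List.map_congr_left (fun p _ => (mainCount p dictionary).symm)
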